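-- pv_equiv track=rewrite | github.com/sanowl/SHIELD | shield/protection/output_guard.py | _generate_safe_response
-- ===== SOURCE A (Python) =====
-- from typing import Dict, List, Any, Optional
--
-- def _generate_safe_response(violations: List[str]) -> str:
--     """Generate a safe response when output is blocked."""
--     if any("pii" in v.lower() for v in violations):
--         return "I apologize, but I cannot provide a response that might contain personal information."
--
--     if any("inappropriate" in v.lower() for v in violations):
--         return "I cannot provide that type of content. Please ask for something else I can help with."
--
--     if any("compliance" in v.lower() for v in violations):
--         return "I cannot provide a response that might violate regulatory requirements."
--
--     return "I apologize, but I cannot provide that response. Please rephrase your request."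
-- ===== SOURCE B (Python) =====
-- MESSAGES = [
--     "I apologize, but I cannot provide that response. Please rephrase your request.",
--     "I cannot provide a response that might violate regulatory requirements.",
--     "I cannot provide that type of content. Please ask for something else I can help with.",
--     "I apologize, but I cannot provide a response that might contain personal information.",
-- ]
--
--
-- def _severity(v):
--     """Classify one violation string into a numeric severity rank."""
--     vl = v.lower()
--     if "pii" in vl:
--         return 3
--     if "inappropriate" in vl:
--         return 2
--     if "compliance" in vl:
--         return 1
--     return 0
--
--
-- def _generate_safe_response(violations):
--     """Generate a safe response when output is blocked."""
--     best = 0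
--     for v in violations:
--         r = _severity(v)
--         if r > best:
--             best = r
--     return MESSAGES[best]
-- ===== Notes on version B (the rewrite author's own statement) =====
-- stated objective: alternative
-- what changed: Each violation is classified once into a numeric severity rank (pii=3, inappropriate=2, compliance=1, other=0), the list is reduced with a running max, and the message is picked by indexing a table with the maximum, instead of A's three independent short-circuiting any() scans over the whole list.
import Mathlib
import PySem

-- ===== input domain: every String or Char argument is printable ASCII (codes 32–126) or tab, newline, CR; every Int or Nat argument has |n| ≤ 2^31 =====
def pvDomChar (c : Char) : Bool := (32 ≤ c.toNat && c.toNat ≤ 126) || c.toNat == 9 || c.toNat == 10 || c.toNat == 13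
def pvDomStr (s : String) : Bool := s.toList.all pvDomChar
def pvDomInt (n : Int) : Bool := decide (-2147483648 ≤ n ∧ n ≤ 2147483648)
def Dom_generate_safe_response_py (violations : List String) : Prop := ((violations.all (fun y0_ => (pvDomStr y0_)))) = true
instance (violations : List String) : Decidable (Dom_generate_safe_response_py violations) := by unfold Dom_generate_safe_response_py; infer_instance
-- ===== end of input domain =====

-- B classifies each violation once into a numeric severity rank, reduces with a running max,
-- and indexes a message table by the maximum, instead of A's three independent any() scans (alternative decomposition).

-- ===== PORT A =====
def generate_safe_response_py (violations : List String) : String :=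
  if violations.any (fun v => PySem.Str.isIn "pii" (PySem.Str.lower v)) then
    "I apologize, but I cannot provide a response that might contain personal information."
  else if violations.any (fun v => PySem.Str.isIn "inappropriate" (PySem.Str.lower v)) then
    "I cannot provide that type of content. Please ask for something else I can help with."
  else if violations.any (fun v => PySem.Str.isIn "compliance" (PySem.Str.lower v)) then
    "I cannot provide a response that might violate regulatory requirements."
  else
    "I apologize, but I cannot provide that response. Please rephrase your request."

-- ===== PORT B =====
-- Python B's MESSAGES table, indexed by severity rank
def pvMessages : List String :=
  ["I apologize, but I cannot provide that response. Please rephrase your request.",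
   "I cannot provide a response that might violate regulatory requirements.",
   "I cannot provide that type of content. Please ask for something else I can help with.",
   "I apologize, but I cannot provide a response that might contain personal information."]

-- Python B's _severity: classify one violation string into a numeric severity rank
def pvSeverity (v : String) : Int :=
  let vl := PySem.Str.lower v
  if PySem.Str.isIn "pii" vl then 3
  else if PySem.Str.isIn "inappropriate" vl then 2
  else if PySem.Str.isIn "compliance" vl then 1
  else 0

def generate_safe_response_py_alt (violations : List String) : String :=
  let best := violations.foldl (fun best v => let r := pvSeverity v; if r > best then r else best) (0 : Int)
  -- MESSAGES[best]: exact, since best always lies in 0..3 (pvSeverity only returns 0..3)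
  (PySem.List.pyGet? pvMessages best).getD ""

-- ===== PRECONDITION & SPEC =====
def Spec_generate_safe_response_py (violations : List String) (out : String) : Prop := out = generate_safe_response_py_alt violations
instance (violations : List String) (out : String) : Decidable (Spec_generate_safe_response_py violations out) := by unfold Spec_generate_safe_response_py; infer_instance

-- ===== CLAIM (what is proved, stated in full; the proofs are below) =====
def Claim_equal_generate_safe_response_py : Prop := ∀ (violations : List String), Dom_generate_safe_response_py violations → Spec_generate_safe_response_py violations (generate_safe_response_py violations)

-- ===== LEMMAS AND PROOFS =====

-- the running max computed by B's fold, characterised by A's three any-scans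
theorem pv_fold_max (violations : List String) (b : Int) (hb : 0 ≤ b) :
    violations.foldl (fun best v => let r := pvSeverity v; if r > best then r else best) b
      = max b (if violations.any (fun v => PySem.Str.isIn "pii" (PySem.Str.lower v)) then 3
          else if violations.any (fun v => PySem.Str.isIn "inappropriate" (PySem.Str.lower v)) then 2
          else if violations.any (fun v => PySem.Str.isIn "compliance" (PySem.Str.lower v)) then 1
          else 0) := by
  induction violations generalizing b with
  | nil => simp; omega
  | cons v rest ih =>
    simp only [List.foldl_cons, List.any_cons, Bool.or_eq_true]
    rw [ih _ (by unfold pvSeverity; split_ifs <;> omega)]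
    unfold pvSeverity
    by_cases hp : PySem.Str.isIn "pii" (PySem.Str.lower v) = true <;>
      by_cases hi : PySem.Str.isIn "inappropriate" (PySem.Str.lower v) = true <;>
        by_cases hc : PySem.Str.isIn "compliance" (PySem.Str.lower v) = true <;>
          simp only [hp, hi, hc, if_true, if_false, true_or, false_or, Bool.false_eq_true] <;>
            split_ifs <;> omega

-- ===== VERDICT (by name: the statement is the Claim_ definition above) =====
theorem generate_safe_response_py_spec : Claim_equal_generate_safe_response_py := by
  intro violations _
  unfold Spec_generate_safe_response_py generate_safe_response_py generate_safe_response_py_alt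
  rw [pv_fold_max _ _ le_rfl]
  split_ifs <;> simp [pvMessages, PySem.List.pyGet?, PySem.List.pyIdx?]
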